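-- pv_equiv track=rewrite | github.com/thevitorhideki/academia-python | quiz_2023.1/valida_entradas.py | valida_entradas
-- ===== SOURCE A (Python) =====
-- def valida_entradas(lista):
--     if len(lista) == 0 or lista[-1] != '=':
--         return False
--     for i, v in enumerate(lista):
--         if i % 2 == 0 and v.isdigit() == False:
--             return False
--         elif v == '=' and i == len(lista) - 1:
--             return True
--         elif i % 2 != 0 and v not in ['+', '-', '*', '/', '%', '**', '//']:
--             return False
--     return True
-- ===== SOURCE B (Python) =====
-- OPS = ['+', '-', '*', '/', '%', '**', '//']
--
--
-- def valida_entradas(lista):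
--     if len(lista) == 0 or lista[-1] != '=':
--         return False
--     it = iter(lista)
--     for tok in it:
--         if not tok.isdigit():
--             return False
--         op = next(it)  # safe: a digit token is never the last token (the last is '=')
--         if op == '=':
--             return next(it, None) is None
--         if op not in OPS:
--             return False
--     return False
-- ===== Notes on version B (the rewrite author's own statement) =====
-- stated objective: alternative
-- what changed: A scans with enumerate, deciding each token's role from its index parity and detecting the end via i == len-1; B drops indices entirely and consumes the tokens pairwise from a single iterator (digit, then operator), returning on the terminal '=' when the iterator is exhausted.
import Mathlib
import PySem

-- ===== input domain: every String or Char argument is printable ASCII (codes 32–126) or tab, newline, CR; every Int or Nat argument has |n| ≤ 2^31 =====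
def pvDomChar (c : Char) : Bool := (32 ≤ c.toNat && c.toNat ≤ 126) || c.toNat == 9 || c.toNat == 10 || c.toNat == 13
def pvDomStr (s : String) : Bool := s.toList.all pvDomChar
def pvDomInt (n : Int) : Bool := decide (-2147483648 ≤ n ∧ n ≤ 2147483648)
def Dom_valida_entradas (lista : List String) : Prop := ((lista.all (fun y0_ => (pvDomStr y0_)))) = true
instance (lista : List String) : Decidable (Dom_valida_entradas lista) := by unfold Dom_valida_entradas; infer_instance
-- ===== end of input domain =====

-- B replaces A's enumerate/parity-indexed scan by a pairwise (digit, operator) consumer with no indices; alternative decomposition, same cost.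


-- ===== PORT A =====
-- the `for i, v in enumerate(lista)` loop of A; n = len(lista), i = current index
def pvGoA (n : Nat) (i : Nat) : List String → Bool
  | [] => true                                   -- loop exhausted: `return True`
  | v :: rest =>
    if i % 2 == 0 && !(PySem.Str.strIsdigit v) then false
    else if v == "=" && i == n - 1 then true
    else if i % 2 != 0 && !((["+", "-", "*", "/", "%", "**", "//"] : List String).contains v) then false
    else pvGoA n (i + 1) rest

def valida_entradas (lista : List String) : Bool :=
  if lista.length == 0 || PySem.List.pyGet? lista (-1) != some "=" then false
  else pvGoA lista.length 0 lista

-- ===== PORT B =====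
-- Source B's module constant OPS
def pvOps : List String := ["+", "-", "*", "/", "%", "**", "//"]

-- B's `for tok in it` loop: the iterator is the list of tokens not yet consumed
def pvGoB : List String → Bool
  | [] => false                                  -- loop exhausted: trailing `return False`
  | tok :: it =>
    if !(PySem.Str.strIsdigit tok) then false
    else
      match it with
      | [] => false                              -- `next(it)` would raise StopIteration; unreachable under B's guard (the last token '=' is not a digit)
      | op :: it2 =>
        if op == "=" then it2.isEmpty            -- `return next(it, None) is None`
        else if !(pvOps.contains op) then false
        else pvGoB it2

def valida_entradas_alt (lista : List String) : Bool :=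
  if lista.length == 0 || PySem.List.pyGet? lista (-1) != some "=" then false
  else pvGoB lista

-- ===== PRECONDITION & SPEC =====
def Spec_valida_entradas (lista : List String) (out : Bool) : Prop := out = valida_entradas_alt lista
instance (lista : List String) (out : Bool) : Decidable (Spec_valida_entradas lista out) := by unfold Spec_valida_entradas; infer_instance

-- ===== CLAIM (what is proved, stated in full; the proofs are below) =====
def Claim_equal_valida_entradas : Prop := ∀ (lista : List String), Dom_valida_entradas lista → Spec_valida_entradas lista (valida_entradas lista)

-- ===== LEMMAS AND PROOFS =====

lemma pvPyGet_neg_one_eq_getLast? (xs : List String) :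
    PySem.List.pyGet? xs (-1) = xs.getLast? := by
  cases xs with
  | nil => simp [PySem.List.pyGet?, PySem.List.pyIdx?]
  | cons a l =>
    simp [PySem.List.pyGet?, PySem.List.pyIdx?, List.getLast?_eq_getElem?]

lemma pvGo_eq : ∀ (m : Nat) (xs : List String) (i n : Nat), xs.length ≤ m → i % 2 = 0 →
    i + xs.length = n → xs ≠ [] → xs.getLast? = some "=" → pvGoA n i xs = pvGoB xs := by
  intro m
  induction m with
  | zero =>
    intro xs i n hm _ _ hne _
    cases xs with
    | nil => exact absurd rfl hne
    | cons a l => simp at hm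
  | succ m ih =>
    intro xs i n hm hi hn hne hlast
    match xs, hne with
    | v :: rest, _ =>
    by_cases hd : PySem.Chars.strIsdigit v.toList = true
    case neg => cases rest <;> simp [pvGoA, pvGoB, hi, hd]
    case pos =>
    have hv : ¬ v = "=" := by
      intro h; rw [h] at hd; exact absurd hd (by decide)
    cases rest with
    | nil => exfalso; simp [List.getLast?] at hlast; exact hv hlast
    | cons w rest2 =>
      have hio : (i + 1) % 2 = 1 := by omega
      have hA : pvGoA n i (v :: w :: rest2) = pvGoA n (i + 1) (w :: rest2) := by
        simp [pvGoA, hi, hd, hv]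
      rw [hA]
      by_cases hw : w = "="
      · subst hw
        cases rest2 with
        | nil =>
          have hb : ((i + 1) == n - 1) = true := by
            have : i + 1 = n - 1 := by simp at hn; omega
            simp [this]
          have h1 : pvGoA n (i + 1) ["="] = true := by simp [pvGoA, hio, hb]
          have h2 : pvGoB [v, "="] = true := by simp [pvGoB, hd]
          rw [h1, h2]
        | cons c r3 =>
          have hb : ((i + 1) == n - 1) = false := by
            have : ¬ (i + 1 = n - 1) := by simp at hn; omega
            exact beq_eq_false_iff_ne.mpr this
          have h1 : pvGoA n (i + 1) ("=" :: c :: r3) = false := by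
            simp [pvGoA, hio, hb]
          have h2 : pvGoB (v :: "=" :: c :: r3) = false := by simp [pvGoB, hd]
          rw [h1, h2]
      · by_cases hop : w ∈ (["+", "-", "*", "/", "%", "**", "//"] : List String)
        · have hA2 : pvGoA n (i + 1) (w :: rest2) = pvGoA n (i + 1 + 1) rest2 := by
            simp [pvGoA, hio, hw, hop]
          have hB : pvGoB (v :: w :: rest2) = pvGoB rest2 := by
            simp [pvGoB, hd, hw, pvOps, hop]
          rw [hA2, hB]
          cases rest2 with
          | nil =>
            exfalso
            have : w = "=" := by simp [List.getLast?] at hlast; exact hlast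
            exact hw this
          | cons c r3 =>
            have hrec := ih (c :: r3) (i + 2) n (by simp at hm ⊢; omega) (by omega)
              (by simp at hn ⊢; omega) (by simp) (by simpa [List.getLast?_cons_cons] using hlast)
            have h12 : i + 1 + 1 = i + 2 := by omega
            rw [h12]
            exact hrec
        · have h1 : pvGoA n (i + 1) (w :: rest2) = false := by
            simp [pvGoA, hio, hw, hop]
          have h2 : pvGoB (v :: w :: rest2) = false := by simp [pvGoB, hd, hw, pvOps, hop]
          rw [h1, h2]

-- ===== VERDICT (by name: the statement is the Claim_ definition above) =====
theorem valida_entradas_spec : Claim_equal_valida_entradas := by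
  intro lista _dom
  unfold Spec_valida_entradas valida_entradas valida_entradas_alt
  by_cases hg : (lista.length == 0 || PySem.List.pyGet? lista (-1) != some "=") = true
  · rw [if_pos hg, if_pos hg]
  · rw [if_neg hg, if_neg hg]
    have h1 : ¬ lista.length = 0 ∧ PySem.List.pyGet? lista (-1) = some "=" := by
      simpa using hg
    have hxs : lista ≠ [] := by
      intro h; subst h; exact h1.1 rfl
    have hlast : lista.getLast? = some "=" := by
      rw [← pvPyGet_neg_one_eq_getLast?]; exact h1.2
    exact pvGo_eq lista.length lista 0 lista.length le_rfl rfl (by omega) hxs hlast
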